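-- pv_equiv track=rewrite | github.com/123R3N321/PTC | cs1114and1134/leetcode3440.py | fasterSolution
-- ===== SOURCE A (Python) =====
-- def gapArrGen(total, starts, ends):
--     res = [starts[0]]
--     for i in range(1,len(starts)):
--         res.append(starts[i]-ends[i-1])
--     res.append(total - ends[-1])
--     return res
--
-- def slidingWindowFindDouble(gapArr):
--     res = gapArr[0] + gapArr[1] # gapArr has at least 2 elems as long as a meeting exists at all
--     for i in range(2, len(gapArr)):
--         local = gapArr[i-1] + gapArr[i]
--         if local>res:
--             res = local
--     return res
--
-- def fasterSolution(totalTime, starts, ends):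
--     gapArr = gapArrGen(totalTime, starts, ends)
--     curBest = slidingWindowFindDouble(gapArr)
--
--     leftSlots = leftSlotsGen(gapArr)
--     rightSlots = rightSlotsGen(gapArr)
--
--     for i in range(len(starts)):
--         if leftSlots[i]>=ends[i]-starts[i] or rightSlots[i+1]>=ends[i]-starts[i]: #check if we could fit this into leftside or right
--             curBest = max(curBest, ends[i]-starts[i]+gapArr[i]+gapArr[i+1])
--     return curBest
--
-- def leftSlotsGen(gapArr):
--     res = [0]   #at ind 0, best slot to left has size 0 (no slot)
--     curBest = 0
--     for i in range(1,len(gapArr)):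
--         if gapArr[i-1]>curBest:
--             curBest = gapArr[i-1]
--         res.append(curBest)
--     return res
--
-- def rightSlotsGen(gapArr):
--     res = [0]
--     curBest = 0
--     for i in range(len(gapArr)-2,-1,-1):
--         if gapArr[i+1]>curBest:
--             curBest = gapArr[i+1]
--         res.append(curBest)
--     res.reverse()
--     return res
-- ===== SOURCE B (Python) =====
-- def _insert_desc(top, v, j):
--     # ordered insert into a value-descending list of (value, index) pairs
--     if not top or v > top[0][0]:
--         return [(v, j)] + top
--     return [top[0]] + _insert_desc(top[1:], v, j)
--
--
-- def fasterSolution(totalTime, starts, ends):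
--     gaps = [starts[0]] + [s - e for s, e in zip(starts[1:], ends)] + [totalTime - ends[-1]]
--     # one pass: keep the three largest gaps together with their indices
--     top = []
--     for j in range(len(gaps)):
--         top = _insert_desc(top, gaps[j], j)[:3]
--     best = gaps[0] + gaps[1]
--     for i in range(len(starts)):
--         d = ends[i] - starts[i]
--         base = gaps[i] + gaps[i + 1]
--         cand = base + d if d > 0 and any(v >= d and j != i and j != i + 1 for v, j in top) else base
--         best = max(best, cand)
--     return best
-- ===== Notes on version B (the rewrite author's own statement) =====
-- stated objective: alternative
-- what changed: Replaces the two directional prefix/suffix-maximum arrays plus the separate sliding-window pass with a single top-3 (value,index) table built in one pass over the gaps and one combined loop over the meetings; feasibility of relocating meeting i is decided from the top-3 table instead of leftSlots/rightSlots.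
import Mathlib
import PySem

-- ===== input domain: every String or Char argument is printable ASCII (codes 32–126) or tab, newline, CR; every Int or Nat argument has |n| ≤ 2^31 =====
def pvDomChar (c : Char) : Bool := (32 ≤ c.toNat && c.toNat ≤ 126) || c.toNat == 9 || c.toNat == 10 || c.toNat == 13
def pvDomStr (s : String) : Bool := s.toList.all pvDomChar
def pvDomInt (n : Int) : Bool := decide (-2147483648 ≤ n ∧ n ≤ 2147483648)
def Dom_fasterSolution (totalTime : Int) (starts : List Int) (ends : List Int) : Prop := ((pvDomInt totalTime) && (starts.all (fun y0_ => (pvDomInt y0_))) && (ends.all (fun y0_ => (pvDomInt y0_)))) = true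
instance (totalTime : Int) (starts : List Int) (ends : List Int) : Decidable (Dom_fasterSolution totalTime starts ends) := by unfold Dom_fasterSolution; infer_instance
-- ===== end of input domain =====

-- B replaces A's prefix/suffix-maximum arrays and separate sliding-window pass by a single
-- top-3 (value,index) table and one combined loop; same O(n) cost, proved equal on Pre_.

-- ===== PORT A =====
def gapArrGen (total : Int) (starts : List Int) (ends : List Int) : List Int :=
  let res := [PySem.List.pyGetD starts 0 0]
  let res := (PySem.List.pyRange 1 (PySem.List.len starts) 1).foldl
    (fun res i => res ++ [PySem.List.pyGetD starts i 0 - PySem.List.pyGetD ends (i - 1) 0]) res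
  res ++ [total - PySem.List.pyGetD ends (-1) 0]

def slidingWindowFindDouble (gapArr : List Int) : Int :=
  let res := PySem.List.pyGetD gapArr 0 0 + PySem.List.pyGetD gapArr 1 0
  (PySem.List.pyRange 2 (PySem.List.len gapArr) 1).foldl
    (fun res i =>
      let lcl := PySem.List.pyGetD gapArr (i - 1) 0 + PySem.List.pyGetD gapArr i 0
      if lcl > res then lcl else res) res

def leftSlotsGen (gapArr : List Int) : List Int :=
  let st := (PySem.List.pyRange 1 (PySem.List.len gapArr) 1).foldl
    (fun (st : List Int × Int) i =>
      let curBest := if PySem.List.pyGetD gapArr (i - 1) 0 > st.2 then PySem.List.pyGetD gapArr (i - 1) 0 else st.2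
      (st.1 ++ [curBest], curBest)) ([0], 0)
  st.1

def rightSlotsGen (gapArr : List Int) : List Int :=
  let st := (PySem.List.pyRange (PySem.List.len gapArr - 2) (-1) (-1)).foldl
    (fun (st : List Int × Int) i =>
      let curBest := if PySem.List.pyGetD gapArr (i + 1) 0 > st.2 then PySem.List.pyGetD gapArr (i + 1) 0 else st.2
      (st.1 ++ [curBest], curBest)) ([0], 0)
  st.1.reverse

def fasterSolution (totalTime : Int) (starts : List Int) (ends : List Int) : Int :=
  let gapArr := gapArrGen totalTime starts ends
  let curBest := slidingWindowFindDouble gapArr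
  let leftSlots := leftSlotsGen gapArr
  let rightSlots := rightSlotsGen gapArr
  (PySem.List.pyRange 0 (PySem.List.len starts) 1).foldl
    (fun curBest i =>
      if PySem.List.pyGetD leftSlots i 0 ≥ PySem.List.pyGetD ends i 0 - PySem.List.pyGetD starts i 0 ∨
         PySem.List.pyGetD rightSlots (i + 1) 0 ≥ PySem.List.pyGetD ends i 0 - PySem.List.pyGetD starts i 0 then
        max curBest (PySem.List.pyGetD ends i 0 - PySem.List.pyGetD starts i 0
          + PySem.List.pyGetD gapArr i 0 + PySem.List.pyGetD gapArr (i + 1) 0)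
      else curBest) curBest

-- ===== PORT B =====
def altInsertDesc (top : List (Int × Int)) (v : Int) (j : Int) : List (Int × Int) :=
  match top with
  | [] => [(v, j)]
  | p :: rest => if v > p.1 then (v, j) :: p :: rest else p :: altInsertDesc rest v j

def fasterSolution_alt (totalTime : Int) (starts : List Int) (ends : List Int) : Int :=
  let gaps := [PySem.List.pyGetD starts 0 0]
    ++ ((PySem.List.slice starts (some 1) none).zip ends).map (fun p => p.1 - p.2)
    ++ [totalTime - PySem.List.pyGetD ends (-1) 0]
  let top := (PySem.List.pyRange 0 (PySem.List.len gaps) 1).foldl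
    (fun t j => (altInsertDesc t (PySem.List.pyGetD gaps j 0) j).take 3) []
  let best := PySem.List.pyGetD gaps 0 0 + PySem.List.pyGetD gaps 1 0
  (PySem.List.pyRange 0 (PySem.List.len starts) 1).foldl
    (fun best i =>
      let d := PySem.List.pyGetD ends i 0 - PySem.List.pyGetD starts i 0
      let base := PySem.List.pyGetD gaps i 0 + PySem.List.pyGetD gaps (i + 1) 0
      let cand := if 0 < d ∧ (top.any fun p => decide (p.1 ≥ d) && decide (p.2 ≠ i) && decide (p.2 ≠ i + 1)) then
          base + d
        else base
      max best cand) best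

-- ===== PRECONDITION & SPEC =====
-- Pre_: exactly the inputs where A returns (A raises IndexError when starts is empty or ends is
-- shorter than starts).
def Pre_fasterSolution (totalTime : Int) (starts : List Int) (ends : List Int) : Prop :=
  starts ≠ [] ∧ starts.length ≤ ends.length
instance (totalTime : Int) (starts : List Int) (ends : List Int) : Decidable (Pre_fasterSolution totalTime starts ends) := by unfold Pre_fasterSolution; infer_instance

def pvWitness_fasterSolution : Int × List Int × List Int := (10, [1, 3], [2, 5])

def Spec_fasterSolution (totalTime : Int) (starts : List Int) (ends : List Int) (out : Int) : Prop := out = fasterSolution_alt totalTime starts ends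
instance (totalTime : Int) (starts : List Int) (ends : List Int) (out : Int) : Decidable (Spec_fasterSolution totalTime starts ends out) := by unfold Spec_fasterSolution; infer_instance

-- ===== CLAIM (what is proved, stated in full; the proofs are below) =====
def Claim_equal_fasterSolution : Prop := ∀ (totalTime : Int) (starts : List Int) (ends : List Int), Dom_fasterSolution totalTime starts ends → Pre_fasterSolution totalTime starts ends → Spec_fasterSolution totalTime starts ends (fasterSolution totalTime starts ends)

-- ===== LEMMAS AND PROOFS =====
-- ===== proof-side definitions =====
def pvPmax (g : List Int) (i : Nat) : Int := (g.take i).foldl max 0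
def pvSmax (g : List Int) (i : Nat) : Int := (g.drop (i+1)).foldl max 0
def pvBase (g : List Int) (i : Nat) : Int := g.getD i 0 + g.getD (i+1) 0
def pvTop (g : List Int) : List (Int × Int) :=
  (List.range g.length).foldl (fun t j => (altInsertDesc t (g.getD j 0) (j : Int)).take 3) []
def pvE (g : List Int) (d : Int) (i : Nat) : Prop :=
  ∃ j : Nat, j < g.length ∧ j ≠ i ∧ j ≠ i + 1 ∧ d ≤ g.getD j 0
def pvEb (g : List Int) (d : Int) (i : Nat) : Bool :=
  (List.range g.length).any (fun j => decide (j ≠ i) && decide (j ≠ i + 1) && decide (d ≤ g.getD j 0))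
def pvGRef (total : Int) (starts ends : List Int) : List Int :=
  [starts.getD 0 0] ++ (List.range (starts.length - 1)).map (fun k => starts.getD (k+1) 0 - ends.getD k 0)
    ++ [total - ends.getD (ends.length - 1) 0]
def pvInv (g : List Int) (k : Nat) (t : List (Int × Int)) : Prop :=
  (∀ p ∈ t, ∃ j : Nat, j < k ∧ p = (g.getD j 0, (j : Int)))
  ∧ (t.map Prod.snd).Nodup
  ∧ (∀ j : Nat, j < k → (↑j ∉ t.map Prod.snd) → t.length = 3 ∧ ∀ p ∈ t, g.getD j 0 ≤ p.1)
  ∧ List.Pairwise (fun p q => q.1 ≤ p.1) t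
  ∧ t.length ≤ 3

-- ===== generic fold lemmas =====
theorem pv_foldl_max_le {γ : Type} (l : List γ) (t : γ → Int) (a M : Int) :
    (∀ i ∈ l, t i ≤ M) → a ≤ M → l.foldl (fun acc i => max acc (t i)) a ≤ M := by
  induction l generalizing a with
  | nil => exact fun _ ha => ha
  | cons x xs ih =>
    intro ht ha
    exact ih (max a (t x)) (fun i hi => ht i (List.mem_cons_of_mem x hi))
      (max_le ha (ht x List.mem_cons_self))

theorem pv_foldl_max_pull (l : List Int) (a x : Int) :
    l.foldl max (max a x) = max (l.foldl max a) x := by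
  induction l generalizing a with
  | nil => rfl
  | cons b bs ih => simp only [List.foldl_cons, max_right_comm a x b, ih]

-- ===== gap list =====
theorem pv_gapA_eq (total : Int) (starts ends : List Int)
    (h1 : starts ≠ []) (h2 : starts.length ≤ ends.length) :
    gapArrGen total starts ends = pvGRef total starts ends := by
  have hlen : 0 < ends.length := lt_of_lt_of_le (List.length_pos_iff.2 h1) h2
  have hne : ends ≠ [] := List.length_pos_iff.1 hlen
  unfold gapArrGen pvGRef
  dsimp only
  rw [PySem.List.len_eq, PySem.List.pyRange_one, List.foldl_map,
    PySem.List.foldl_append_singleton_eq_map (f := fun k : Nat =>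
      PySem.List.pyGetD starts (1 + (k : Int)) 0 - PySem.List.pyGetD ends (1 + (k : Int) - 1) 0),
    PySem.List.pyGetD_neg_one ends 0 hne, PySem.List.pyGetD_zero]
  have h3 : ((starts.length : Int) - 1).toNat = starts.length - 1 := by omega
  rw [h3]
  congr 1
  · congr 1
    apply List.map_congr_left
    intro k _
    have e1 : (1 + (k : Int)) = ((k + 1 : Nat) : Int) := by push_cast; ring
    have e2 : ((k + 1 : Nat) : Int) - 1 = ((k : Nat) : Int) := by push_cast; ring
    rw [e1, e2, PySem.List.pyGetD_natCast, PySem.List.pyGetD_natCast]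
  · rw [List.getLast_eq_getElem, List.getD_eq_getElem ends 0 (by omega)]

theorem pv_gapB_eq (total : Int) (starts ends : List Int)
    (h1 : starts ≠ []) (h2 : starts.length ≤ ends.length) :
    [PySem.List.pyGetD starts 0 0]
      ++ ((PySem.List.slice starts (some 1) none).zip ends).map (fun p => p.1 - p.2)
      ++ [total - PySem.List.pyGetD ends (-1) 0] = pvGRef total starts ends := by
  have hlen : 0 < ends.length := lt_of_lt_of_le (List.length_pos_iff.2 h1) h2
  have hne : ends ≠ [] := List.length_pos_iff.1 hlen
  unfold pvGRef
  rw [PySem.List.slice_from_one, PySem.List.pyGetD_neg_one ends 0 hne, PySem.List.pyGetD_zero]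
  congr 1
  · congr 1
    apply List.ext_getElem
    · simp; omega
    · intro k hk1 hk2
      simp only [List.getElem_map, List.getElem_zip, List.getElem_tail, List.getElem_range]
      have hl : k + 1 < starts.length := by simp at hk1; omega
      have hk : k < ends.length := by omega
      rw [List.getD_eq_getElem starts 0 hl, List.getD_eq_getElem ends 0 hk]
  · rw [List.getLast_eq_getElem, List.getD_eq_getElem ends 0 (by omega)]

theorem pv_gRef_len (total : Int) (starts ends : List Int) (h1 : starts ≠ []) :
    (pvGRef total starts ends).length = starts.length + 1 := by
  have : starts.length ≠ 0 := fun h => h1 (List.eq_nil_of_length_eq_zero h)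
  simp [pvGRef]; omega

-- ===== pmax / smax =====
theorem pv_pmax_nonneg (g : List Int) (i : Nat) : 0 ≤ pvPmax g i :=
  (PySem.List.le_foldl_max (g.take i) 0).1

theorem pv_pmax_succ (g : List Int) (i : Nat) (h : i < g.length) :
    pvPmax g (i+1) = max (pvPmax g i) (g.getD i 0) := by
  unfold pvPmax
  rw [List.take_add_one, List.getElem?_eq_getElem h, List.getD_eq_getElem g 0 h,
    Option.toList_some, List.foldl_append, List.foldl_cons, List.foldl_nil]

theorem pv_smax_rec (g : List Int) (i : Nat) (h : i + 1 < g.length) :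
    pvSmax g i = max (pvSmax g (i+1)) (g.getD (i+1) 0) := by
  unfold pvSmax
  rw [List.drop_eq_getElem_cons h, List.foldl_cons, pv_foldl_max_pull,
    List.getD_eq_getElem g 0 h]

theorem pv_pmax_ge_iff (g : List Int) (i : Nat) (d : Int) (hd : 0 < d) :
    d ≤ pvPmax g i ↔ ∃ j : Nat, j < i ∧ j < g.length ∧ d ≤ g.getD j 0 := by
  constructor
  · intro hle
    rcases PySem.List.foldl_max_mem (g.take i) 0 with h0 | hmem
    · exfalso; rw [pvPmax, h0] at hle; omega
    · rcases List.mem_iff_getElem.1 hmem with ⟨k, hk, hget⟩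
      have hk' : k < i ∧ k < g.length := by
        have := hk; rw [List.length_take] at this; omega
      refine ⟨k, hk'.1, hk'.2, ?_⟩
      rw [List.getD_eq_getElem g 0 hk'.2, ← List.getElem_take (j := i) (h := hk), hget]
      exact hle
  · rintro ⟨j, hji, hjl, hd⟩
    have hjt : j < (g.take i).length := by rw [List.length_take]; omega
    have hmem : g[j] ∈ g.take i := by
      rw [← List.getElem_take (j := i) (h := hjt)]; exact List.getElem_mem _
    have := (PySem.List.le_foldl_max (g.take i) 0).2 _ hmem
    rw [List.getD_eq_getElem g 0 hjl] at hd
    exact le_trans hd this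

theorem pv_smax_ge_iff (g : List Int) (i : Nat) (d : Int) (hd : 0 < d) :
    d ≤ pvSmax g i ↔ ∃ j : Nat, i < j ∧ j < g.length ∧ d ≤ g.getD j 0 := by
  constructor
  · intro hle
    rcases PySem.List.foldl_max_mem (g.drop (i+1)) 0 with h0 | hmem
    · exfalso; rw [pvSmax, h0] at hle; omega
    · rcases List.mem_iff_getElem.1 hmem with ⟨k, hk, hget⟩
      have hk' : i + 1 + k < g.length := by
        have := hk; rw [List.length_drop] at this; omega
      refine ⟨i + 1 + k, by omega, hk', ?_⟩
      rw [List.getD_eq_getElem g 0 hk', ← List.getElem_drop (h := by omega), hget]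
      · exact hle
  · rintro ⟨j, hji, hjl, hd⟩
    have hjt : j - (i+1) < (g.drop (i+1)).length := by rw [List.length_drop]; omega
    have hmem : g[j] ∈ g.drop (i+1) := by
      have : g[j] = (g.drop (i+1))[j - (i+1)] := by
        rw [List.getElem_drop]
        congr 1; omega
      rw [this]; exact List.getElem_mem _
    have := (PySem.List.le_foldl_max (g.drop (i+1)) 0).2 _ hmem
    rw [List.getD_eq_getElem g 0 hjl] at hd
    exact le_trans hd this

-- ===== A's helper loops =====
theorem pv_pyGetD_one {α : Type} (xs : List α) (d : α) :
    PySem.List.pyGetD xs (1 : Int) d = xs.getD 1 d := by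
  have h : (1 : Int) = ((1 : Nat) : Int) := by norm_cast
  rw [h, PySem.List.pyGetD_natCast]

theorem pv_if_max (a b : Int) : (if b > a then b else a) = max a b := by
  split_ifs with h <;> omega

theorem pv_left_aux (g : List Int) (m : Nat) (hm : m ≤ g.length) :
    (List.range m).foldl (fun (st : List Int × Int) (k : Nat) =>
        (st.1 ++ [if PySem.List.pyGetD g (1 + (k : Int) - 1) 0 > st.2 then PySem.List.pyGetD g (1 + (k : Int) - 1) 0 else st.2],
         if PySem.List.pyGetD g (1 + (k : Int) - 1) 0 > st.2 then PySem.List.pyGetD g (1 + (k : Int) - 1) 0 else st.2)) ([0], 0)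
      = ((List.range (m+1)).map (fun i => pvPmax g i), pvPmax g m) := by
  induction m with
  | zero => simp [pvPmax]
  | succ m ih =>
    rw [List.range_succ, List.foldl_append, ih (by omega), List.foldl_cons, List.foldl_nil]
    have e : (1 + (m : Int) - 1) = ((m : Nat) : Int) := by push_cast; ring
    rw [e, PySem.List.pyGetD_natCast, pv_if_max, ← pv_pmax_succ g m (by omega)]
    rw [List.range_succ (n := m + 1), List.map_append]
    rfl
theorem pv_leftSlots_eq (g : List Int) (h : 1 ≤ g.length) :
    leftSlotsGen g = (List.range g.length).map (fun i => pvPmax g i) := by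
  unfold leftSlotsGen
  dsimp only
  rw [PySem.List.len_eq, PySem.List.pyRange_one, List.foldl_map]
  have h3 : ((g.length : Int) - 1).toNat = g.length - 1 := by omega
  rw [h3, pv_left_aux g (g.length - 1) (by omega)]
  have h4 : g.length - 1 + 1 = g.length := by omega
  rw [h4]

theorem pv_right_aux (g : List Int) (m : Nat) (hm : m ≤ g.length - 1) :
    (List.range m).foldl (fun (st : List Int × Int) (k : Nat) =>
        (st.1 ++ [if PySem.List.pyGetD g (((g.length : Int) - 2 - (k : Int)) + 1) 0 > st.2 then
            PySem.List.pyGetD g (((g.length : Int) - 2 - (k : Int)) + 1) 0 else st.2],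
         if PySem.List.pyGetD g (((g.length : Int) - 2 - (k : Int)) + 1) 0 > st.2 then
            PySem.List.pyGetD g (((g.length : Int) - 2 - (k : Int)) + 1) 0 else st.2)) ([0], 0)
      = ([0] ++ (List.range m).map (fun t => pvSmax g (g.length - 2 - t)), pvSmax g (g.length - 1 - m)) := by
  induction m with
  | zero =>
    simp only [List.range_zero, List.foldl_nil, List.map_nil, List.append_nil]
    have h0 : pvSmax g (g.length - 1 - 0) = 0 := by
      unfold pvSmax
      rw [List.drop_eq_nil_iff.2 (by omega)]
      rfl
    rw [h0]
  | succ m ih =>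
    rw [List.range_succ, List.foldl_append, ih (by omega), List.foldl_cons, List.foldl_nil]
    have e : ((g.length : Int) - 2 - (m : Int)) + 1 = ((g.length - 1 - m : Nat) : Int) := by omega
    rw [e, PySem.List.pyGetD_natCast, pv_if_max]
    have e2 : pvSmax g (g.length - 2 - m) = max (pvSmax g (g.length - 1 - m)) (g.getD (g.length - 1 - m) 0) := by
      have e3 : g.length - 2 - m + 1 = g.length - 1 - m := by omega
      rw [← e3]
      exact pv_smax_rec g (g.length - 2 - m) (by omega)
    rw [← e2]
    have e4 : g.length - 1 - (m + 1) = g.length - 2 - m := by omega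
    rw [e4]
    simp [List.map_append]

theorem pv_range_reverse_map (M : Nat) (f : Nat → Int)  :
    ((List.range M).map f).reverse = (List.range M).map (fun k => f (M - 1 - k)) := by
  apply List.ext_getElem
  · simp
  · intro k hk1 hk2
    simp only [List.getElem_reverse, List.getElem_map, List.getElem_range]
    congr 1
    simp at hk1
    simp

theorem pv_rightSlots_eq (g : List Int) (h : 1 ≤ g.length) :
    rightSlotsGen g = (List.range g.length).map (fun i => pvSmax g i) := by
  unfold rightSlotsGen
  dsimp only
  rw [PySem.List.len_eq, PySem.List.pyRange_neg_one, List.foldl_map]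
  have h3 : ((g.length : Int) - 2 - (-1)).toNat = g.length - 1 := by omega
  rw [h3, pv_right_aux g (g.length - 1) (by omega)]
  rw [List.reverse_append, List.reverse_singleton, pv_range_reverse_map]
  have h4 : g.length = (g.length - 1) + 1 := by omega
  rw [h4, List.range_succ]
  simp only [List.map_append, List.map_cons, List.map_nil]
  congr 1
  · apply List.map_congr_left
    intro t ht
    simp only [List.mem_range] at ht
    congr 1
    omega
  · have h5 : pvSmax g (g.length - 1) = 0 := by
      unfold pvSmax
      rw [List.drop_eq_nil_iff.2 (by omega)]
      rfl
    rw [h5]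

theorem pv_sliding_eq (g : List Int) :
    slidingWindowFindDouble g =
      (List.range (g.length - 2)).foldl (fun acc k => max acc (pvBase g (k+1)))
        (PySem.List.pyGetD g 0 0 + PySem.List.pyGetD g 1 0) := by
  unfold slidingWindowFindDouble
  dsimp only
  rw [PySem.List.len_eq, PySem.List.pyRange_one, List.foldl_map]
  have h3 : ((g.length : Int) - 2).toNat = g.length - 2 := by omega
  rw [h3]
  apply PySem.List.foldl_congr_mem
  intro acc k _
  have e1 : (2 + (k : Int) - 1) = ((k + 1 : Nat) : Int) := by push_cast; ring
  have e2 : (2 + (k : Int)) = ((k + 2 : Nat) : Int) := by push_cast; ring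
  rw [e1, e2, PySem.List.pyGetD_natCast, PySem.List.pyGetD_natCast, pv_if_max]
  rfl

-- ===== insertDesc lemmas =====
theorem pv_ins_mem (t : List (Int × Int)) (v : Int) (j : Int) (q : Int × Int) :
    q ∈ altInsertDesc t v j ↔ q = (v, j) ∨ q ∈ t := by
  induction t with
  | nil => simp [altInsertDesc]
  | cons p rest ih =>
    unfold altInsertDesc
    split_ifs with h
    · simp
    · simp only [List.mem_cons, ih]
      tauto

theorem pv_ins_len (t : List (Int × Int)) (v : Int) (j : Int) :
    (altInsertDesc t v j).length = t.length + 1 := by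
  induction t with
  | nil => rfl
  | cons p rest ih =>
    unfold altInsertDesc
    split_ifs with h
    · rfl
    · simp [ih]

theorem pv_ins_snd_perm (t : List (Int × Int)) (v : Int) (j : Int) :
    ((altInsertDesc t v j).map Prod.snd).Perm (j :: t.map Prod.snd) := by
  induction t with
  | nil => simp [altInsertDesc]
  | cons p rest ih =>
    unfold altInsertDesc
    split_ifs with h
    · simp
    · simp only [List.map_cons]
      exact (List.Perm.cons p.2 ih).trans (List.Perm.swap j p.2 (rest.map Prod.snd))

theorem pv_ins_pairwise (t : List (Int × Int)) (v : Int) (j : Int)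
    (h : List.Pairwise (fun p q => q.1 ≤ p.1) t) :
    List.Pairwise (fun p q => q.1 ≤ p.1) (altInsertDesc t v j) := by
  induction t with
  | nil => simp [altInsertDesc]
  | cons p rest ih =>
    rw [List.pairwise_cons] at h
    unfold altInsertDesc
    split_ifs with hv
    · refine List.pairwise_cons.2 ⟨?_, List.pairwise_cons.2 ⟨h.1, h.2⟩⟩
      intro q hq
      rcases List.mem_cons.1 hq with rfl | hq'
      · omega
      · have := h.1 q hq'; omega
    · refine List.pairwise_cons.2 ⟨?_, ih h.2⟩
      intro q hq
      rcases (pv_ins_mem rest v j q).1 hq with rfl | hq'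
      · simpa using not_lt.1 hv
      · exact h.1 q hq'

-- the invariant is preserved by one step
theorem pv_inv_step (g : List Int) (k : Nat) (t : List (Int × Int))
    (h : pvInv g k t) (hk : k < g.length) :
    pvInv g (k+1) ((altInsertDesc t (g.getD k 0) (k : Int)).take 3) := by
  obtain ⟨hA, hB, hC, hD, hE⟩ := h
  set v := g.getD k 0 with hv
  set l := altInsertDesc t v (k : Int) with hl
  set t' := l.take 3 with ht'
  have f1 : ∀ p ∈ l, p = (v, (k : Int)) ∨ p ∈ t := fun p hp => (pv_ins_mem t v _ p).1 hp
  have f1' : (v, (k : Int)) ∈ l := (pv_ins_mem t v _ _).2 (Or.inl rfl)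
  have f2 : l.length = t.length + 1 := pv_ins_len t v _
  have f3 : (l.map Prod.snd).Perm ((k : Int) :: t.map Prod.snd) := pv_ins_snd_perm t v _
  have f4 : List.Pairwise (fun p q => q.1 ≤ p.1) l := pv_ins_pairwise t v _ hD
  have f5 : ((k : Int)) ∉ t.map Prod.snd := by
    intro hmem
    rcases List.mem_map.1 hmem with ⟨p, hp, hsnd⟩
    rcases hA p hp with ⟨j, hjk, rfl⟩
    simp only at hsnd
    omega
  have f6 : (l.map Prod.snd).Nodup := (List.Perm.nodup_iff f3).2 (List.nodup_cons.2 ⟨f5, hB⟩)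
  have f7 : l.Nodup := f6.of_map
  have gA : ∀ p ∈ t', ∃ j : Nat, j < k + 1 ∧ p = (g.getD j 0, (j : Int)) := by
    intro p hp
    rcases f1 p (List.mem_of_mem_take hp) with rfl | hpt
    · exact ⟨k, by omega, rfl⟩
    · rcases hA p hpt with ⟨j, hjk, rfl⟩
      exact ⟨j, by omega, rfl⟩
  have gB : (t'.map Prod.snd).Nodup := by
    rw [ht', List.map_take]
    exact f6.sublist (List.take_sublist _ _)
  have gE : List.Pairwise (fun p q => q.1 ≤ p.1) t' := f4.sublist (List.take_sublist _ _)
  have gL : t'.length ≤ 3 := by simp [ht']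
  refine ⟨gA, gB, ?_, gE, gL⟩
  intro j hj hnot
  by_cases hcase : t.length ≤ 2
  · -- nothing dropped
    have htl : t' = l := List.take_of_length_le (by omega)
    rcases Nat.lt_succ_iff_lt_or_eq.1 hj with hjk | rfl
    · by_cases hin : ((j : Int)) ∈ t.map Prod.snd
      · exfalso
        apply hnot
        rw [htl]
        exact (f3.mem_iff).2 (List.mem_cons_of_mem _ hin)
      · exact absurd (hC j hjk hin).1 (by omega)
    · exfalso
      apply hnot
      rw [htl]
      exact List.mem_map.2 ⟨(v, (j : Int)), f1', rfl⟩
  · -- t.length = 3, l.length = 4, the last element w of l is dropped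
    have ht3 : t.length = 3 := by omega
    have hl4 : l.length = 4 := by omega
    have h34 : 3 < l.length := by omega
    set w := l[3] with hw
    have fw_mem : w ∈ l := List.getElem_mem h34
    have gl3 : t'.length = 3 := by simp [ht', hl4]
    have fw_le : ∀ p ∈ t', w.1 ≤ p.1 := by
      intro p hp
      rcases List.mem_iff_getElem.1 hp with ⟨a, ha, hget⟩
      have ha3 : a < 3 := by simpa [gl3] using ha
      have h2 := List.pairwise_iff_getElem.1 f4 a 3 (by omega) h34 (by omega)
      have hp' : p = l[a] := by
        rw [← hget]
        simp only [ht', List.getElem_take]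
      rw [hp']
      exact h2
    have fmem_split : ∀ p ∈ l, p ∈ t' ∨ p = w := by
      intro p hp
      rcases List.mem_iff_getElem.1 hp with ⟨a, ha, hget⟩
      by_cases ha3 : a < 3
      · refine Or.inl ?_
        have haa : a < t'.length := by omega
        have hmem := List.getElem_mem haa
        have he : t'[a] = l[a] := by simp only [ht', List.getElem_take]
        rw [he] at hmem
        rw [← hget]
        exact hmem
      · have : a = 3 := by omega
        subst this
        exact Or.inr hget.symm
    have fw_notin : w ∉ t' := by
      intro hmem
      rcases List.mem_iff_getElem.1 hmem with ⟨a, ha, hget⟩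
      have ha3 : a < 3 := by simpa [gl3] using ha
      simp only [ht', List.getElem_take] at hget
      exact absurd (List.Nodup.getElem_inj_iff f7 |>.1 (hget.trans hw)) (by omega)
    refine ⟨gl3, ?_⟩
    rcases Nat.lt_succ_iff_lt_or_eq.1 hj with hjk | rfl
    · by_cases hin : ((j : Int)) ∈ t.map Prod.snd
      · -- old entry for j got dropped: it is w
        rcases List.mem_map.1 hin with ⟨p₀, hp₀t, hsnd⟩
        rcases hA p₀ hp₀t with ⟨j', hj'k, rfl⟩
        have : j' = j := by simp only at hsnd; omega
        subst this
        have hp₀l : (g.getD j' 0, (j' : Int)) ∈ l := (pv_ins_mem t v _ _).2 (Or.inr hp₀t)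
        rcases fmem_split _ hp₀l with hmem' | heq2
        · exact absurd (List.mem_map.2 ⟨_, hmem', rfl⟩) hnot
        · intro p hp
          have he3 : g.getD j' 0 = w.1 := by rw [← heq2]
          rw [he3]
          exact fw_le p hp
      · -- j was already outside t
        obtain ⟨_, hvals⟩ := hC j hjk hin
        intro p hp
        rcases f1 p (List.mem_of_mem_take hp) with rfl | hpt
        · -- p is the new entry (v, k); need getD j ≤ v
          rcases fmem_split _ fw_mem with hwt' | _
          · exact absurd hwt' fw_notin
          · rcases f1 w fw_mem with hwnew | hwt
            · exfalso
              exact fw_notin (hwnew ▸ hp)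
            · exact le_trans (hvals w hwt) (fw_le _ hp)
        · exact hvals p hpt
    · -- j = k: the new entry itself was dropped
      have : (v, (j : Int)) ∈ t' ∨ (v, (j : Int)) = w := fmem_split _ f1'
      rcases this with hmem' | heq
      · exact absurd (List.mem_map.2 ⟨_, hmem', rfl⟩) hnot
      · intro p hp
        calc g.getD j 0 = w.1 := by rw [← heq]
        _ ≤ p.1 := fw_le p hp

theorem pv_inv_aux (g : List Int) (m : Nat) (hm : m ≤ g.length) :
    pvInv g m ((List.range m).foldl
      (fun t j => (altInsertDesc t (g.getD j 0) (j : Int)).take 3) []) := by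
  induction m with
  | zero =>
    refine ⟨by simp, by simp, by omega, by simp, by simp⟩
  | succ m ih =>
    rw [List.range_succ, List.foldl_append, List.foldl_cons, List.foldl_nil]
    exact pv_inv_step g m _ (ih (by omega)) (by omega)

theorem pv_inv_top (g : List Int) : pvInv g g.length (pvTop g) :=
  pv_inv_aux g g.length le_rfl

-- top-3 bridge
theorem pv_top_iff (g : List Int) (d : Int) (i : Nat) (hd : 0 < d) :
    (∃ p ∈ pvTop g, d ≤ p.1 ∧ p.2 ≠ (i : Int) ∧ p.2 ≠ (i : Int) + 1) ↔ pvE g d i := by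
  obtain ⟨hA, hB, hC, _, _⟩ := pv_inv_top g
  constructor
  · rintro ⟨p, hp, hd1, hne1, hne2⟩
    rcases hA p hp with ⟨j, hj, rfl⟩
    refine ⟨j, hj, ?_, ?_, hd1⟩
    · intro h; subst h; exact hne1 rfl
    · intro h; subst h; exact hne2 (by push_cast; ring)
  · rintro ⟨j, hjl, hji, hji1, hdj⟩
    by_cases hin : ((j : Int)) ∈ (pvTop g).map Prod.snd
    · rcases List.mem_map.1 hin with ⟨p, hp, hsnd⟩
      rcases hA p hp with ⟨j', hj', rfl⟩
      have : j' = j := by simp only at hsnd; omega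
      subst this
      exact ⟨_, hp, by simpa using hdj, by simp; omega, by simp; omega⟩
    · obtain ⟨hlen3, hvals⟩ := hC j hjl hin
      -- three entries with distinct indices: one avoids i and i+1
      match htop : pvTop g, hlen3 with
      | [p0, p1, p2], _ =>
        rw [htop] at hA hB hvals
        have h0 := hA p0 (by simp)
        have h1 := hA p1 (by simp)
        have h2 := hA p2 (by simp)
        simp only [List.map_cons, List.map_nil, List.nodup_cons, List.mem_cons] at hB
        have hd0 := hvals p0 (by simp)
        have hd1 := hvals p1 (by simp)
        have hd2 := hvals p2 (by simp)
        by_cases c0 : p0.2 ≠ (i : Int) ∧ p0.2 ≠ (i : Int) + 1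
        · exact ⟨p0, by simp, le_trans hdj hd0, c0.1, c0.2⟩
        by_cases c1 : p1.2 ≠ (i : Int) ∧ p1.2 ≠ (i : Int) + 1
        · exact ⟨p1, by simp, le_trans hdj hd1, c1.1, c1.2⟩
        by_cases c2 : p2.2 ≠ (i : Int) ∧ p2.2 ≠ (i : Int) + 1
        · exact ⟨p2, by simp, le_trans hdj hd2, c2.1, c2.2⟩
        · exfalso
          push_neg at c0 c1 c2
          have e0 : p0.2 = (i : Int) ∨ p0.2 = (i : Int) + 1 := by tauto
          have e1 : p1.2 = (i : Int) ∨ p1.2 = (i : Int) + 1 := by tauto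
          have e2 : p2.2 = (i : Int) ∨ p2.2 = (i : Int) + 1 := by tauto
          rcases e0 with h | h <;> rcases e1 with h' | h' <;> rcases e2 with h'' | h'' <;>
            simp_all <;> omega

-- A's condition in terms of pvE
theorem pv_pvEb_iff (g : List Int) (d : Int) (i : Nat) : pvEb g d i = true ↔ pvE g d i := by
  unfold pvEb pvE
  simp only [List.any_eq_true, List.mem_range, Bool.and_eq_true, decide_eq_true_eq]
  tauto

theorem pv_condA_iff (g : List Int) (d : Int) (k : Nat) (hk1 : k + 1 < g.length) :
    (d ≤ pvPmax g k ∨ d ≤ pvSmax g (k+1)) ↔ (d ≤ 0 ∨ (0 < d ∧ pvE g d k)) := by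
  by_cases hd : 0 < d
  · constructor
    · rintro (h | h)
      · rcases (pv_pmax_ge_iff g k d hd).1 h with ⟨j, hji, hjl, hdj⟩
        exact Or.inr ⟨hd, j, hjl, by omega, by omega, hdj⟩
      · rcases (pv_smax_ge_iff g (k+1) d hd).1 h with ⟨j, hji, hjl, hdj⟩
        exact Or.inr ⟨hd, j, hjl, by omega, by omega, hdj⟩
    · rintro (h | ⟨-, j, hjl, hji, hji1, hdj⟩)
      · omega
      · rcases Nat.lt_or_ge j k with hjk | hjk
        · exact Or.inl ((pv_pmax_ge_iff g k d hd).2 ⟨j, hjk, hjl, hdj⟩)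
        · exact Or.inr ((pv_smax_ge_iff g (k+1) d hd).2 ⟨j, by omega, hjl, hdj⟩)
  · exact iff_of_true (Or.inl (le_trans (by omega) (pv_pmax_nonneg g k))) (Or.inl (by omega))

theorem pv_main (g : List Int) (n : Nat) (dd : Nat → Int)
    (hg : g.length = n + 1) (hn : 0 < n) :
    (List.range n).foldl (fun acc k =>
        if dd k ≤ pvPmax g k ∨ dd k ≤ pvSmax g (k+1) then
          max acc (dd k + g.getD k 0 + g.getD (k+1) 0)
        else acc)
      ((List.range (g.length - 2)).foldl (fun acc k => max acc (pvBase g (k+1))) (pvBase g 0))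
    = (List.range n).foldl (fun acc k =>
        max acc (if 0 < dd k ∧ pvEb g (dd k) k = true then pvBase g k + dd k else pvBase g k))
      (pvBase g 0) := by
  set Sl := (List.range (g.length - 2)).foldl (fun acc k => max acc (pvBase g (k+1))) (pvBase g 0) with hSl
  set cand := fun k => if 0 < dd k ∧ pvEb g (dd k) k = true then pvBase g k + dd k else pvBase g k with hcand
  set B := (List.range n).foldl (fun acc k => max acc (cand k)) (pvBase g 0) with hB
  have le_Sl : ∀ j, j + 1 < g.length → pvBase g j ≤ Sl := by
    intro j hj
    match j with
    | 0 => exact (PySem.List.le_foldl_max_int _ _ _).1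
    | m + 1 => exact (PySem.List.le_foldl_max_int _ _ _).2 m (by simp; omega)
  have Sl_le : ∀ M : Int, pvBase g 0 ≤ M → (∀ j, j + 1 < g.length → pvBase g j ≤ M) → Sl ≤ M := by
    intro M h0 hj
    exact pv_foldl_max_le _ _ _ _ (fun m hm => hj (m+1) (by simp at hm; omega)) h0
  have base_le_cand : ∀ k, pvBase g k ≤ cand k := by
    intro k
    rw [hcand]
    dsimp only
    split_ifs with h
    · omega
    · omega
  have le_B := PySem.List.le_foldl_max_int (List.range n) cand (pvBase g 0)
  rw [PySem.List.foldl_ite_eq_foldl_filter (p := fun k => dd k ≤ pvPmax g k ∨ dd k ≤ pvSmax g (k+1))]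
  set F := (List.range n).filter (fun k => decide (dd k ≤ pvPmax g k ∨ dd k ≤ pvSmax g (k+1))) with hF
  set A := F.foldl (fun acc k => max acc (dd k + g.getD k 0 + g.getD (k+1) 0)) Sl with hA
  have le_A := PySem.List.le_foldl_max_int F (fun k => dd k + g.getD k 0 + g.getD (k+1) 0) Sl
  have hmemF : ∀ k, k ∈ F ↔ (k < n ∧ (dd k ≤ 0 ∨ (0 < dd k ∧ pvE g (dd k) k))) := by
    intro k
    rw [hF, List.mem_filter]
    simp only [List.mem_range, decide_eq_true_eq]
    constructor
    · rintro ⟨hk, hc⟩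
      exact ⟨hk, (pv_condA_iff g (dd k) k (by omega)).1 hc⟩
    · rintro ⟨hk, hc⟩
      exact ⟨hk, (pv_condA_iff g (dd k) k (by omega)).2 hc⟩
  apply le_antisymm
  · apply pv_foldl_max_le
    · -- every selected term is ≤ B
      intro k hk
      rcases (hmemF k).1 hk with ⟨hkn, hc | ⟨hdk, hE⟩⟩
      · have : cand k ≤ B := le_B.2 k (by simp [hkn])
        have := base_le_cand k
        have : pvBase g k ≤ B := by omega
        unfold pvBase at this
        omega
      · have hcB : cand k ≤ B := le_B.2 k (by simp [hkn])
        rw [hcand] at hcB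
        simp only [if_pos (⟨hdk, (pv_pvEb_iff g (dd k) k).2 hE⟩ : 0 < dd k ∧ pvEb g (dd k) k = true)] at hcB
        unfold pvBase at hcB
        omega
    · -- Sl ≤ B
      apply Sl_le
      · exact le_B.1
      · intro j hj
        have hjn : j < n := by omega
        have := le_B.2 j (by simp [hjn])
        have := base_le_cand j
        omega
  · apply pv_foldl_max_le
    · intro k hk
      have hkn : k < n := by simpa using hk
      rw [hcand]
      dsimp only
      split_ifs with hc
      · have hkF : k ∈ F := (hmemF k).2 ⟨hkn, Or.inr ⟨hc.1, (pv_pvEb_iff g (dd k) k).1 hc.2⟩⟩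
        have := le_A.2 k hkF
        unfold pvBase
        omega
      · have : pvBase g k ≤ Sl := le_Sl k (by omega)
        have := le_A.1
        omega
    · exact le_trans (le_Sl 0 (by omega)) le_A.1

theorem pv_final (totalTime : Int) (starts ends : List Int)
    (h1 : starts ≠ []) (h2 : starts.length ≤ ends.length) :
    fasterSolution totalTime starts ends = fasterSolution_alt totalTime starts ends := by
  have hn : 0 < starts.length := List.length_pos_iff.2 h1
  unfold fasterSolution fasterSolution_alt
  dsimp only
  rw [pv_gapA_eq totalTime starts ends h1 h2, pv_gapB_eq totalTime starts ends h1 h2]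
  set g := pvGRef totalTime starts ends with hgdef
  set n := starts.length with hndef
  have hg : g.length = n + 1 := pv_gRef_len totalTime starts ends h1
  rw [pv_leftSlots_eq g (by omega), pv_rightSlots_eq g (by omega), pv_sliding_eq g]
  simp only [PySem.List.len_eq, PySem.List.pyRange_zero_nat, List.foldl_map]
  have htop : (List.range g.length).foldl
      (fun t (k : Nat) => (altInsertDesc t (PySem.List.pyGetD g ((k : Nat) : Int) 0) ((k : Nat) : Int)).take 3) []
      = pvTop g := by
    unfold pvTop
    apply PySem.List.foldl_congr_mem
    intro t k _
    rw [PySem.List.pyGetD_natCast]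
  rw [htop]
  have hinit : PySem.List.pyGetD g 0 0 + PySem.List.pyGetD g 1 0 = pvBase g 0 := by
    rw [PySem.List.pyGetD_zero, pv_pyGetD_one]
    rfl
  rw [hinit]
  refine Eq.trans ?_ (Eq.trans (pv_main g n (fun k => ends.getD k 0 - starts.getD k 0) hg hn) ?_)
  · apply PySem.List.foldl_congr_mem
    intro acc k hk
    have hkn : k < n := by simpa using hk
    have ek : ((k : Int) + 1) = ((k + 1 : Nat) : Int) := by push_cast; ring
    rw [ek]
    simp only [PySem.List.pyGetD_natCast]
    rw [PySem.List.getD_map_range _ _ _ _ (by omega), PySem.List.getD_map_range _ _ _ _ (by omega)]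
  · symm
    apply PySem.List.foldl_congr_mem
    intro acc k hk
    have hkn : k < n := by simpa using hk
    set D := PySem.List.pyGetD ends (k : Int) 0 - PySem.List.pyGetD starts (k : Int) 0 with hD
    have hD' : D = ends.getD k 0 - starts.getD k 0 := by
      rw [hD, PySem.List.pyGetD_natCast, PySem.List.pyGetD_natCast]
    have ek : ((k : Int) + 1) = ((k + 1 : Nat) : Int) := by push_cast; ring
    have hbase : PySem.List.pyGetD g (k : Int) 0 + PySem.List.pyGetD g ((k : Int) + 1) 0 = pvBase g k := by
      rw [ek, PySem.List.pyGetD_natCast, PySem.List.pyGetD_natCast]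
      rfl
    have hc : (0 < D ∧ ((pvTop g).any fun p => decide (p.1 ≥ D) && decide (p.2 ≠ (k : Int)) && decide (p.2 ≠ (k : Int) + 1)) = true)
        ↔ (0 < (ends.getD k 0 - starts.getD k 0) ∧ pvEb g (ends.getD k 0 - starts.getD k 0) k = true) := by
      rw [← hD']
      constructor
      · rintro ⟨hd, ha⟩
        refine ⟨hd, (pv_pvEb_iff g D k).2 ((pv_top_iff g D k hd).1 ?_)⟩
        simpa [List.any_eq_true, Bool.and_eq_true, decide_eq_true_eq, ge_iff_le, and_assoc] using ha
      · rintro ⟨hd, hb⟩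
        have h3 := (pv_top_iff g D k hd).2 ((pv_pvEb_iff g D k).1 hb)
        refine ⟨hd, ?_⟩
        simpa [List.any_eq_true, Bool.and_eq_true, decide_eq_true_eq, ge_iff_le, and_assoc] using h3
    congr 1
    rw [if_congr hc rfl rfl, hbase, hD']

-- ===== VERDICT (by name: the statement is the Claim_ definition above) =====
theorem fasterSolution_spec : Claim_equal_fasterSolution := by
  intro totalTime starts ends _ hpre
  obtain ⟨h1, h2⟩ := hpre
  unfold Spec_fasterSolution
  exact pv_final totalTime starts ends h1 h2
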